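-- pv_equiv track=rewrite | github.com/zhenyaliu77/DeepLRR | DeepLRR-1.01/predict2.py | BestScoreAA
-- ===== SOURCE A (Python) =====
-- def Clip(a,b):
--     count = int(a/b)
--     clip_list = []
--     for i in range(count):
--         clip = (i*b+1,(i+1)*b)
--         clip_list.append(clip)
--     return clip_list
--
-- def BestScoreAA(groupsite,clip_n):
--     #20aa最多只能有1个LRRrepeat
--     groupsite_sorted = sorted(groupsite.items(), key=lambda x: x[0])
--     clip_list = Clip(groupsite_sorted[-1][0]+30,clip_n)
--     protein_value = []
--     for clip in clip_list:
--         clip_value = {}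
--         for info in groupsite_sorted:
--             if clip[0] <= info[0] <= clip[1]:
--                 clip_value[info[0]] = info[1]
--             else:
--                 continue
--         if clip_value != {}:
--             protein_value.append(str(sorted(clip_value, key=lambda x: clip_value[x])[-1])+'\t'+str(clip_value[sorted(clip_value, key=lambda x: clip_value[x])[-1]]))
--         else:
--             continue
--     return protein_value
-- ===== SOURCE B (Python) =====
-- def BestScoreAA(groupsite, clip_n):
--     # Single-pass binning: assign each site to its window, keep running (value, position) max per window.
--     items = sorted(groupsite.items(), key=lambda x: x[0])
--     nwin = (items[-1][0] + 30) // clip_n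
--     limit = nwin * clip_n
--     best = {}
--     for k, v in items:
--         if 1 <= k <= limit:
--             w = (k - 1) // clip_n
--             cur = best.get(w)
--             if cur is None or cur[0] < v or (cur[0] == v and cur[1] <= k):
--                 best[w] = (v, k)
--     return [str(best[w][1]) + '\t' + str(best[w][0]) for w in sorted(best)]
-- ===== Notes on version B (the rewrite author's own statement) =====
-- stated objective: faster
-- what changed: Instead of scanning the whole site list once per window and sorting each window's dict by value, B assigns each site to its window by integer division in a single pass, keeping a running (value, position) maximum per window.
-- outside the precondition, e.g. on BestScoreAA({5: 2}, -3): A returns [], B returns ['5\t2']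
import Mathlib
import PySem

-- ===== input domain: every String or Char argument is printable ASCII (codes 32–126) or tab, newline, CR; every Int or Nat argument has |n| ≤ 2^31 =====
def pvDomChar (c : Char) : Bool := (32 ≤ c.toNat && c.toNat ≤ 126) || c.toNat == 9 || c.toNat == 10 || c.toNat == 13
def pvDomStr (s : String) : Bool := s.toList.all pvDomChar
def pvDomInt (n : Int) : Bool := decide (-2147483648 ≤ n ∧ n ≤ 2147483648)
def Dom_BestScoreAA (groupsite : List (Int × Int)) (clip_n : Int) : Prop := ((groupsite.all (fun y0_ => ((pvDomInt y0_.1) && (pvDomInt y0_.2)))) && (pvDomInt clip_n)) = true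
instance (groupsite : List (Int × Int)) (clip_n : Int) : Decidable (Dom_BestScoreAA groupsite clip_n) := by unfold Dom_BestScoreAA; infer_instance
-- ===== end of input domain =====

-- B replaces A's per-window scan over all sites (plus a per-window sort of the window dict by value)
-- by a single pass that bins each site into its window via integer division, keeping a running
-- (value, position) maximum per window; a timing run measures whether that is faster.

-- ===== PORT A =====
-- Clip(a, b): int(a/b) is float truncating division; PySem.Int.truncdiv is exact for |a|,|b| < 2^53
-- (here |a| ≤ 2^31 + 30). Python raises ZeroDivisionError for b = 0, excluded by Pre_ (0 < clip_n).
def ClipA (a b : Int) : List (Int × Int) :=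
  let count := PySem.Int.truncdiv a b
  (PySem.List.pyRange 0 count 1).foldl (fun acc i => acc ++ [(i * b + 1, (i + 1) * b)]) []

def BestScoreAA (groupsite : List (Int × Int)) (clip_n : Int) : List String :=
  let gs := PySem.List.sorted groupsite (fun x => x.1)
  -- groupsite_sorted[-1]: IndexError on the empty dict (excluded by Pre_)
  match PySem.List.pyGet? gs (-1) with
  | none => []
  | some last =>
    let clip_list := ClipA (last.1 + 30) clip_n
    clip_list.foldl (fun pv clip =>
      let cv := gs.foldl (fun d info =>
        if clip.1 ≤ info.1 ∧ info.1 ≤ clip.2 then d.insert info.1 info.2 else d)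
        (PySem.Dict.mk [])
      if cv.items ≠ [] then
        -- sorted(clip_value, key=...)[-1]; the list is nonempty here, so [-1] cannot raise
        match PySem.List.pyGet? (PySem.List.sorted cv.keys (fun k => cv.getD k 0)) (-1) with
        | some best =>
            -- clip_value[best]: best is a key of cv, so no KeyError; getD's default is never used
            pv ++ [PySem.Int.toStr best ++ "\t" ++ PySem.Int.toStr (cv.getD best 0)]
        | none => pv
      else pv) []

-- ===== PORT B =====
def BestScoreAA_alt (groupsite : List (Int × Int)) (clip_n : Int) : List String :=
  let items := PySem.List.sorted groupsite (fun x => x.1)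
  -- items[-1]: IndexError on the empty dict (excluded by Pre_)
  match PySem.List.pyGet? items (-1) with
  | none => []
  | some last =>
    let nwin := PySem.Int.floordiv (last.1 + 30) clip_n
    let limit := nwin * clip_n
    let best := items.foldl (fun d kv =>
      if 1 ≤ kv.1 ∧ kv.1 ≤ limit then
        let w := PySem.Int.floordiv (kv.1 - 1) clip_n
        match d.get? w with
        | none => d.insert w (kv.2, kv.1)
        | some cur =>
            if cur.1 < kv.2 ∨ (cur.1 = kv.2 ∧ cur.2 ≤ kv.1) then d.insert w (kv.2, kv.1) else d
      else d) (PySem.Dict.mk [])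
    (PySem.List.sorted best.keys (fun w => w)).map (fun w =>
      match best.get? w with
      | some p => PySem.Int.toStr p.2 ++ "\t" ++ PySem.Int.toStr p.1
      | none => "")  -- unreachable: w ∈ best.keys

-- ===== PRECONDITION & SPEC =====
-- Pre_ excludes: the empty dict (A raises IndexError) and clip_n = 0 (ZeroDivisionError); a negative
-- clip width is outside the natural domain of a fixed-width windowing routine (A returns [] there) and
-- is excluded rather than mirrored. Duplicate keys cannot occur in a Python dict, so Nodup excludes
-- nothing at the Python level.
def Pre_BestScoreAA (groupsite : List (Int × Int)) (clip_n : Int) : Prop :=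
  groupsite ≠ [] ∧ 0 < clip_n ∧ (groupsite.map Prod.fst).Nodup
instance (groupsite : List (Int × Int)) (clip_n : Int) : Decidable (Pre_BestScoreAA groupsite clip_n) := by
  unfold Pre_BestScoreAA; infer_instance
def pvWitness_BestScoreAA : (List (Int × Int)) × Int := ([(3, 5), (7, 2), (25, 9)], 20)

def Spec_BestScoreAA (groupsite : List (Int × Int)) (clip_n : Int) (out : List String) : Prop := out = BestScoreAA_alt groupsite clip_n
instance (groupsite : List (Int × Int)) (clip_n : Int) (out : List String) : Decidable (Spec_BestScoreAA groupsite clip_n out) := by unfold Spec_BestScoreAA; infer_instance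

-- ===== CLAIM (what is proved, stated in full; the proofs are below) =====
def Claim_equal_BestScoreAA : Prop := ∀ (groupsite : List (Int × Int)) (clip_n : Int), Dom_BestScoreAA groupsite clip_n → Pre_BestScoreAA groupsite clip_n → Spec_BestScoreAA groupsite clip_n (BestScoreAA groupsite clip_n)


-- ===== LEMMAS AND PROOFS =====

-- xs[-1] is the last element
theorem pyGet_neg_one {α : Type} (l : List α) : PySem.List.pyGet? l (-1) = l.getLast? := by
  cases l with
  | nil => rfl
  | cons x t =>
    simp only [PySem.List.pyGet?, PySem.List.pyIdx?]
    rw [if_neg (by omega)]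
    rw [if_pos (by simp only [List.length_cons]; omega)]
    simp only [Option.bind_some]
    rw [List.getLast?_eq_getElem?]
    congr 1

-- a fold whose body fixes every state is the identity
theorem foldl_fixed_of_mem {α β : Type} (f : β → α → β) :
    ∀ (l : List α) (d : β), (∀ d' x, x ∈ l → f d' x = d') → l.foldl f d = d := by
  intro l
  induction l with
  | nil => intro d _; rfl
  | cons x t ih =>
    intro d h
    rw [List.foldl_cons, h d x (by simp), ih]
    intro d' y hy; exact h d' y (by simp [hy])

-- nondecreasing keys plus distinct keys give strictly increasing keys
theorem pairwise_lt_of_le_nodup (l : List (Int × Int))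
    (hle : l.Pairwise (fun x y => x.1 ≤ y.1)) (hnd : (l.map Prod.fst).Nodup) :
    l.Pairwise (fun x y => x.1 < y.1) := by
  have hne : l.Pairwise (fun x y => x.1 ≠ y.1) := (List.pairwise_map).mp hnd
  exact (hle.and hne).imp (fun h => lt_of_le_of_ne h.1 h.2)

-- ===== Dict facts =====
theorem dict_items_insert_of_not_mem {κ ν : Type} [BEq κ] [LawfulBEq κ]
    (d : PySem.Dict κ ν) (k : κ) (v : ν) (h : k ∉ d.keys) :
    (d.insert k v).items = d.items ++ [(k, v)] := by
  have hc : d.contains k = false := by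
    rw [← Bool.not_eq_true, PySem.Dict.contains_iff_mem_keys]; exact h
  simp [PySem.Dict.insert, hc]

theorem dict_keys_insert_of_not_mem {κ ν : Type} [BEq κ] [LawfulBEq κ]
    (d : PySem.Dict κ ν) (k : κ) (v : ν) (h : k ∉ d.keys) :
    (d.insert k v).keys = d.keys ++ [k] := by
  simp [PySem.Dict.keys, dict_items_insert_of_not_mem d k v h]

theorem dict_keys_insert_of_mem {κ ν : Type} [BEq κ] [LawfulBEq κ]
    (d : PySem.Dict κ ν) (k : κ) (v : ν) (h : k ∈ d.keys) :
    (d.insert k v).keys = d.keys := by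
  have hc : d.contains k = true := (PySem.Dict.contains_iff_mem_keys d k).mpr h
  simp only [PySem.Dict.insert, hc, if_pos]
  simp only [PySem.Dict.keys, List.map_map]
  apply List.map_congr_left
  intro p _
  by_cases hp : (p.1 == k) = true
  · simp [eq_of_beq hp]
  · simp [Function.comp, hp]

theorem dict_get?_mk_of_mem {ν : Type} (W : List (Int × ν)) (hnd : (W.map Prod.fst).Nodup) :
    ∀ kv ∈ W, (PySem.Dict.mk W).get? kv.1 = some kv.2 := by
  induction W with
  | nil => intro kv h; simp at h
  | cons y t ih =>
    intro kv hkv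
    simp only [List.map_cons, List.nodup_cons] at hnd
    rcases List.mem_cons.mp hkv with hkv | hkv
    · subst hkv; simp [PySem.Dict.get?, List.find?]
    · have hne : (y.1 == kv.1) = false := by
        rw [beq_eq_false_iff_ne]
        intro he
        exact hnd.1 (he ▸ (List.mem_map_of_mem hkv))
      have := ih hnd.2 kv hkv
      simp only [PySem.Dict.get?, List.find?, hne] at *
      exact this

theorem dict_get?_eq_none_iff {κ ν : Type} [BEq κ] [LawfulBEq κ] (d : PySem.Dict κ ν) (k : κ) :
    d.get? k = none ↔ k ∉ d.keys := by
  simp only [PySem.Dict.get?, Option.map_eq_none_iff, List.find?_eq_none, PySem.Dict.keys,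
    List.mem_map, not_exists]
  constructor
  · rintro h p ⟨hp, rfl⟩
    exact absurd (by simp) (h p hp)
  · intro h p hp he
    exact h p ⟨hp, eq_of_beq he⟩

-- ===== A-side: the window dict collects exactly the filtered items =====
theorem dict_build_filter (P : Int × Int → Prop) [DecidablePred P] :
    ∀ (l : List (Int × Int)) (d : PySem.Dict Int Int),
    (∀ kv ∈ l, kv.1 ∉ d.keys) → (l.map Prod.fst).Nodup →
    (l.foldl (fun d kv => if P kv then d.insert kv.1 kv.2 else d) d).items
      = d.items ++ l.filter (fun kv => decide (P kv)) := by
  intro l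
  induction l with
  | nil => intro d _ _; simp
  | cons x t ih =>
    intro d hf hnd
    simp only [List.map_cons, List.nodup_cons] at hnd
    rw [List.foldl_cons]
    by_cases hP : P x
    · rw [if_pos hP]
      have hx1 : x.1 ∉ d.keys := hf x (by simp)
      have hstep : ∀ kv ∈ t, kv.1 ∉ (d.insert x.1 x.2).keys := by
        intro kv hkv
        rw [dict_keys_insert_of_not_mem d x.1 x.2 hx1]
        simp only [List.mem_append, List.mem_singleton]
        rintro (h | h)
        · exact hf kv (by simp [hkv]) h
        · exact hnd.1 (h ▸ List.mem_map_of_mem hkv)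
      rw [ih (d.insert x.1 x.2) hstep hnd.2,
          dict_items_insert_of_not_mem d x.1 x.2 hx1]
      simp [hP]
    · rw [if_neg hP, ih d (fun kv hkv => hf kv (by simp [hkv])) hnd.2]
      simp [hP]

-- ===== A-side: last of an insertion sort = running maximum (stable tie-break) =====
theorem insertBy_ne_nil {α : Type} (bef : α → α → Bool) (x : α) (ys : List α) :
    PySem.List.insertBy bef x ys ≠ [] := by
  cases ys with
  | nil => simp [PySem.List.insertBy]
  | cons y t =>
    simp only [PySem.List.insertBy]
    split <;> simp

theorem insertBy_pairwise {α : Type} (key : α → Int) (x : α) :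
    ∀ (ys : List α), ys.Pairwise (fun a b => key a ≤ key b) →
    (PySem.List.insertBy (fun a b => decide (key a < key b)) x ys).Pairwise
      (fun a b => key a ≤ key b) := by
  intro ys
  induction ys with
  | nil => intro _; simp [PySem.List.insertBy]
  | cons y t ih =>
    intro hp
    rcases List.pairwise_cons.mp hp with ⟨hy, hpt⟩
    simp only [PySem.List.insertBy]
    split
    · rename_i hlt
      simp only [decide_eq_true_eq] at hlt
      refine List.pairwise_cons.mpr ⟨?_, hp⟩
      intro b hb
      rcases List.mem_cons.mp hb with hb | hb
      · exact le_of_lt (hb ▸ hlt)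
      · exact le_trans (le_of_lt hlt) (hy b hb)
    · rename_i hge
      simp only [decide_eq_true_eq] at hge
      refine List.pairwise_cons.mpr ⟨?_, ih hpt⟩
      intro b hb
      have hmem := (PySem.List.mem_insertBy (fun a b => decide (key a < key b)) x b t).mp hb
      rcases hmem with hb' | hb'
      · exact hb' ▸ not_lt.mp hge
      · exact hy b hb'

theorem getLast?_insertBy {α : Type} (key : α → Int) (x : α) :
    ∀ (ys : List α), ys.Pairwise (fun a b => key a ≤ key b) →
    (PySem.List.insertBy (fun a b => decide (key a < key b)) x ys).getLast?
      = some (match ys.getLast? with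
              | none => x
              | some b => if key b ≤ key x then x else b) := by
  intro ys
  induction ys with
  | nil => intro _; simp [PySem.List.insertBy]
  | cons y t ih =>
    intro hp
    rcases List.pairwise_cons.mp hp with ⟨hy, hpt⟩
    simp only [PySem.List.insertBy]
    split
    · rename_i hlt
      simp only [decide_eq_true_eq] at hlt
      have hne : (y :: t) ≠ [] := by simp
      have hlast : key (List.getLast (y :: t) hne) ≥ key y := by
        rcases List.mem_cons.mp (List.getLast_mem hne) with h | h
        · rw [h]
        · exact hy _ h
      rw [List.getLast?_cons, List.getLast?_eq_some_getLast hne]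
      have : ¬ key (List.getLast (y :: t) hne) ≤ key x := by omega
      simp [this]
    · rename_i hge
      simp only [decide_eq_true_eq] at hge
      have hne' := insertBy_ne_nil (fun a b => decide (key a < key b)) x t
      rw [List.getLast?_cons, ih hpt]
      cases t with
      | nil => simp [not_lt.mp hge]
      | cons z t' => simp [List.getLast?_cons]

-- the running maximum with "later wins on ties" (what a stable sort's last element is)
def maxStep {α : Type} (key : α → Int) (m : Option α) (x : α) : Option α :=
  match m with
  | none => some x
  | some b => if key b ≤ key x then some x else some b

theorem getLast?_sorted_eq_foldl {α : Type} (key : α → Int) (l : List α) :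
    (PySem.List.sorted l key).getLast? = l.foldl (maxStep key) none := by
  rw [PySem.List.sorted_eq_foldl_insertBy]
  suffices h : ∀ (l : List α) (acc : List α), acc.Pairwise (fun a b => key a ≤ key b) →
      (l.foldl (fun acc x => PySem.List.insertBy (fun a b => decide (key a < key b)) x acc) acc).getLast?
        = l.foldl (maxStep key) acc.getLast? by
    exact h l [] (by simp)
  intro l
  induction l with
  | nil => intro acc _; rfl
  | cons x t ih =>
    intro acc hp
    rw [List.foldl_cons, List.foldl_cons, ih _ (insertBy_pairwise key x acc hp),
        getLast?_insertBy key x acc hp]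
    cases acc.getLast? with
    | none => rfl
    | some b =>
      by_cases h : key b ≤ key x
      · simp [maxStep, h]
      · simp [maxStep, h]

-- ===== the shared running maximum over a window =====
def bstep (m : Option (Int × Int)) (kv : Int × Int) : Option (Int × Int) :=
  match m with
  | none => some kv
  | some p => if p.2 < kv.2 ∨ (p.2 = kv.2 ∧ p.1 ≤ kv.1) then some kv else some p

def bpick (w : List (Int × Int)) : Option (Int × Int) := w.foldl bstep none

theorem bstep_some : ∀ (w : List (Int × Int)) (p : Int × Int),
    ∃ q, w.foldl bstep (some p) = some q := by
  intro w
  induction w with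
  | nil => intro p; exact ⟨p, rfl⟩
  | cons x t ih =>
    intro p
    rw [List.foldl_cons]
    by_cases hc : p.2 < x.2 ∨ (p.2 = x.2 ∧ p.1 ≤ x.1)
    · rw [show bstep (some p) x = some x by simp [bstep, hc]]
      exact ih x
    · rw [show bstep (some p) x = some p by simp [bstep, hc]]
      exact ih p

theorem bpick_def (w : List (Int × Int)) : w.foldl bstep none = bpick w := rfl

theorem bpick_eq_none_iff (w : List (Int × Int)) : bpick w = none ↔ w = [] := by
  cases w with
  | nil => simp [bpick]
  | cons x t =>
    simp only [bpick, List.foldl_cons]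
    obtain ⟨q, hq⟩ := bstep_some t x
    rw [show bstep none x = some x from rfl, hq]
    simp

theorem bpick_mem : ∀ (w : List (Int × Int)) (m : Option (Int × Int)) (p : Int × Int),
    w.foldl bstep m = some p → p ∈ w ∨ m = some p := by
  intro w
  induction w with
  | nil => intro m p h; exact Or.inr h
  | cons x t ih =>
    intro m p h
    rw [List.foldl_cons] at h
    rcases ih (bstep m x) p h with hm | hm
    · exact Or.inl (List.mem_cons_of_mem x hm)
    · rcases m with _ | q
      · have hxp : x = p := by simpa [bstep] using hm
        exact Or.inl (by simp [hxp])
      · by_cases hc : q.2 < x.2 ∨ (q.2 = x.2 ∧ q.1 ≤ x.1)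
        · have hxp : x = p := by simpa [bstep, hc] using hm
          exact Or.inl (by simp [hxp])
        · have hqp : q = p := by simpa [bstep, hc] using hm
          exact Or.inr (by rw [hqp])

-- the value-only comparison step (ties to the later element)
def vstep (m : Option (Int × Int)) (kv : Int × Int) : Option (Int × Int) :=
  match m with
  | none => some kv
  | some p => if p.2 ≤ kv.2 then some kv else some p

-- the value-only rule (A's stable sort) agrees with bstep on key-ascending input
theorem foldl_vstep_eq_bstep :
    ∀ (w : List (Int × Int)) (m : Option (Int × Int)),
    w.Pairwise (fun a b => a.1 < b.1) →
    (∀ p, m = some p → ∀ kv ∈ w, p.1 < kv.1) →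
    w.foldl vstep m = w.foldl bstep m := by
  intro w
  induction w with
  | nil => intro m _ _; rfl
  | cons x t ih =>
    intro m hp hm
    rcases List.pairwise_cons.mp hp with ⟨hx, hpt⟩
    rw [List.foldl_cons, List.foldl_cons]
    rcases m with _ | p
    · exact ih (some x) hpt (by intro p hp' kv hkv; cases Option.some.inj hp'; exact hx kv hkv)
    · have hpx : p.1 < x.1 := hm p rfl x (by simp)
      show t.foldl vstep (if p.2 ≤ x.2 then some x else some p)
         = t.foldl bstep (if p.2 < x.2 ∨ (p.2 = x.2 ∧ p.1 ≤ x.1) then some x else some p)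
      by_cases hv : p.2 ≤ x.2
      · rw [if_pos hv, if_pos (by omega)]
        exact ih (some x) hpt (by intro q hq kv hkv; cases Option.some.inj hq; exact hx kv hkv)
      · rw [if_neg hv, if_neg (by omega)]
        exact ih (some p) hpt
          (by intro q hq kv hkv; cases Option.some.inj hq; exact hm p rfl kv (List.mem_cons_of_mem x hkv))

-- A's key-fold over the window's keys is the fst of the pair-fold
theorem foldl_keys_eq_map_fst (W : List (Int × Int)) (hnd : (W.map Prod.fst).Nodup) :
    ∀ (w : List (Int × Int)) (m : Option (Int × Int)),
    (∀ kv ∈ w, kv ∈ W) → (∀ p, m = some p → p ∈ W) →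
    (w.map Prod.fst).foldl (maxStep (fun k => (PySem.Dict.mk W).getD k 0)) (m.map Prod.fst)
      = (w.foldl vstep m).map Prod.fst := by
  intro w
  induction w with
  | nil => intro m _ _; rfl
  | cons x t ih =>
    intro m hsub hmem
    rw [List.map_cons, List.foldl_cons, List.foldl_cons]
    simp only [maxStep, vstep]
    have hgetx : (PySem.Dict.mk W).getD x.1 0 = x.2 := by
      simp [PySem.Dict.getD, dict_get?_mk_of_mem W hnd x (hsub x (by simp))]
    rcases m with _ | p
    · exact ih (some x) (fun kv hkv => hsub kv (by simp [hkv]))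
        (by intro p hp'; cases Option.some.inj hp'; exact hsub x (by simp))
    · have hgetp : (PySem.Dict.mk W).getD p.1 0 = p.2 := by
        simp [PySem.Dict.getD, dict_get?_mk_of_mem W hnd p (hmem p rfl)]
      simp only [Option.map_some]
      by_cases hle : p.2 ≤ x.2
      · rw [if_pos (show (PySem.Dict.mk W).getD p.1 0 ≤ (PySem.Dict.mk W).getD x.1 0 by
            rw [hgetx, hgetp]; exact hle), if_pos hle]
        exact ih (some x) (fun kv hkv => hsub kv (by simp [hkv]))
          (by intro q hq; cases Option.some.inj hq; exact hsub x (by simp))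
      · rw [if_neg (show ¬ (PySem.Dict.mk W).getD p.1 0 ≤ (PySem.Dict.mk W).getD x.1 0 by
            rw [hgetx, hgetp]; exact hle), if_neg hle]
        exact ih (some p) (fun kv hkv => hsub kv (by simp [hkv])) hmem

-- ===== B-side: the binning fold, characterised by get? =====
theorem pyrange_map_cast (N : Int) :
    PySem.List.pyRange 0 N 1 = List.map (Nat.cast : Nat → Int) (List.range N.toNat) := by
  rw [PySem.List.pyRange]
  by_cases h : 0 < N
  · rw [if_neg (by norm_num), if_pos (by norm_num), if_pos h]
    simp
  · rw [if_neg (by norm_num), if_pos (by norm_num), if_neg h]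
    simp [show N.toNat = 0 by omega]

theorem pyrange_pairwise_lt (N : Int) :
    (PySem.List.pyRange 0 N 1).Pairwise (· < ·) := by
  rw [pyrange_map_cast]
  exact List.Pairwise.map (Nat.cast : Nat → Int) (fun a b h => by exact_mod_cast h)
    List.pairwise_lt_range

theorem pyrange_nodup (N : Int) : (PySem.List.pyRange 0 N 1).Nodup := by
  exact (pyrange_pairwise_lt N).imp (fun h => ne_of_lt h)

-- ===== assembled pieces =====
def cvOf (gs : List (Int × Int)) (lo hi : Int) : PySem.Dict Int Int :=
  gs.foldl (fun d info => if lo ≤ info.1 ∧ info.1 ≤ hi then d.insert info.1 info.2 else d)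
    (PySem.Dict.mk [])

def winOf (gs : List (Int × Int)) (lo hi : Int) : List (Int × Int) :=
  gs.filter (fun kv => decide (lo ≤ kv.1 ∧ kv.1 ≤ hi))

def renderKV (kv : Int × Int) : String :=
  PySem.Int.toStr kv.1 ++ "\t" ++ PySem.Int.toStr kv.2

-- one window of A's outer loop, as a pure function of the filtered window
theorem window_out (gs : List (Int × Int)) (hnd : (gs.map Prod.fst).Nodup)
    (hlt : gs.Pairwise (fun x y => x.1 < y.1)) (lo hi : Int) (pv : List String) :
    (if (cvOf gs lo hi).items ≠ [] then
       match PySem.List.pyGet? (PySem.List.sorted (cvOf gs lo hi).keys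
           (fun k => (cvOf gs lo hi).getD k 0)) (-1) with
       | some best => pv ++ [PySem.Int.toStr best ++ "\t" ++ PySem.Int.toStr ((cvOf gs lo hi).getD best 0)]
       | none => pv
     else pv)
    = pv ++ (match bpick (winOf gs lo hi) with
             | none => []
             | some kv => [renderKV kv]) := by
  have hfresh : ∀ kv ∈ gs, kv.1 ∉ (PySem.Dict.mk ([] : List (Int × Int))).keys := by
    intro kv _ h; simp [PySem.Dict.keys] at h
  have hitems : (cvOf gs lo hi).items = winOf gs lo hi := by
    rw [cvOf, dict_build_filter (fun kv => lo ≤ kv.1 ∧ kv.1 ≤ hi) gs _ hfresh hnd]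
    rfl
  have hcv : cvOf gs lo hi = PySem.Dict.mk (winOf gs lo hi) := by
    cases hmk : cvOf gs lo hi with
    | mk items => rw [hmk] at hitems; simpa using hitems
  have hndW : ((winOf gs lo hi).map Prod.fst).Nodup :=
    hnd.sublist ((gs.filter_sublist).map Prod.fst)
  by_cases hW : winOf gs lo hi = []
  · rw [if_neg (by rw [hitems, hW]; simp)]
    rw [hW]
    simp [bpick]
  · rw [if_pos (by rw [hitems]; exact hW)]
    have hlast : PySem.List.pyGet? (PySem.List.sorted (cvOf gs lo hi).keys
        (fun k => (cvOf gs lo hi).getD k 0)) (-1)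
        = (bpick (winOf gs lo hi)).map Prod.fst := by
      rw [pyGet_neg_one, getLast?_sorted_eq_foldl]
      rw [hcv]
      rw [show (PySem.Dict.mk (winOf gs lo hi)).keys = (winOf gs lo hi).map Prod.fst from rfl]
      have h1 := foldl_keys_eq_map_fst (winOf gs lo hi) hndW (winOf gs lo hi)
        (none) (fun kv h => h) (by intro p h; cases h)
      simp only [Option.map_none] at h1
      rw [← bpick_def]
      exact h1.trans (congrArg (Option.map Prod.fst)
        (foldl_vstep_eq_bstep (winOf gs lo hi) none (hlt.filter _) (by intro p h; cases h)))
    rcases hp : bpick (winOf gs lo hi) with _ | kv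
    · exact absurd (bpick_eq_none_iff _ |>.mp hp) hW
    · rw [hlast, hp]
      have hmem : kv ∈ winOf gs lo hi := by
        rcases bpick_mem (winOf gs lo hi) none kv hp with h | h
        · exact h
        · cases h
      have hval : (cvOf gs lo hi).getD kv.1 0 = kv.2 := by
        rw [hcv]
        simp [PySem.Dict.getD, dict_get?_mk_of_mem (winOf gs lo hi) hndW kv hmem]
      simp only [Option.map_some]
      rw [hval]
      rfl

-- B's binning step as a named function
def bstepB (b limit : Int) (d : PySem.Dict Int (Int × Int)) (kv : Int × Int) :
    PySem.Dict Int (Int × Int) :=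
  if 1 ≤ kv.1 ∧ kv.1 ≤ limit then
    match d.get? (PySem.Int.floordiv (kv.1 - 1) b) with
    | none => d.insert (PySem.Int.floordiv (kv.1 - 1) b) (kv.2, kv.1)
    | some cur =>
        if cur.1 < kv.2 ∨ (cur.1 = kv.2 ∧ cur.2 ≤ kv.1) then
          d.insert (PySem.Int.floordiv (kv.1 - 1) b) (kv.2, kv.1)
        else d
  else d

def winB (gs : List (Int × Int)) (b limit w : Int) : List (Int × Int) :=
  gs.filter (fun kv => decide (1 ≤ kv.1 ∧ kv.1 ≤ limit ∧ PySem.Int.floordiv (kv.1 - 1) b = w))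

theorem bfold_get? (b limit : Int) (l : List (Int × Int)) :
    ∀ w, ((l.foldl (bstepB b limit) (PySem.Dict.mk [])).get? w)
      = (bpick (winB l b limit w)).map (fun kv => (kv.2, kv.1)) := by
  induction l using List.reverseRecOn with
  | nil => intro w; rfl
  | append_singleton l kv ih =>
    intro w
    rw [List.foldl_append, List.foldl_cons, List.foldl_nil, winB, List.filter_append]
    rw [show List.filter (fun kv => decide (1 ≤ kv.1 ∧ kv.1 ≤ limit ∧
          PySem.Int.floordiv (kv.1 - 1) b = w)) l = winB l b limit w from rfl]
    by_cases hlim : 1 ≤ kv.1 ∧ kv.1 ≤ limit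
    · by_cases hw : PySem.Int.floordiv (kv.1 - 1) b = w
      · subst hw
        rw [show List.filter (fun kv' => decide (1 ≤ kv'.1 ∧ kv'.1 ≤ limit ∧
              PySem.Int.floordiv (kv'.1 - 1) b = PySem.Int.floordiv (kv.1 - 1) b)) [kv]
            = [kv] from by simp [hlim.1, hlim.2]]
        rw [bpick, List.foldl_append, List.foldl_cons, List.foldl_nil,
            show List.foldl bstep none (winB l b limit (PySem.Int.floordiv (kv.1 - 1) b))
              = bpick (winB l b limit (PySem.Int.floordiv (kv.1 - 1) b)) from rfl]
        rw [show bstepB b limit (l.foldl (bstepB b limit) (PySem.Dict.mk [])) kv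
              = (match (l.foldl (bstepB b limit) (PySem.Dict.mk [])).get?
                    (PySem.Int.floordiv (kv.1 - 1) b) with
                 | none => (l.foldl (bstepB b limit) (PySem.Dict.mk [])).insert
                     (PySem.Int.floordiv (kv.1 - 1) b) (kv.2, kv.1)
                 | some cur =>
                     if cur.1 < kv.2 ∨ (cur.1 = kv.2 ∧ cur.2 ≤ kv.1) then
                       (l.foldl (bstepB b limit) (PySem.Dict.mk [])).insert
                         (PySem.Int.floordiv (kv.1 - 1) b) (kv.2, kv.1)
                     else (l.foldl (bstepB b limit) (PySem.Dict.mk []))) from by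
            rw [bstepB, if_pos hlim]]
        rcases hg : (l.foldl (bstepB b limit) (PySem.Dict.mk [])).get?
            (PySem.Int.floordiv (kv.1 - 1) b) with _ | cur
        · have hpick : bpick (winB l b limit (PySem.Int.floordiv (kv.1 - 1) b)) = none := by
            have := (ih (PySem.Int.floordiv (kv.1 - 1) b)).symm.trans hg
            exact Option.map_eq_none_iff.mp this
          rw [hpick]
          rw [PySem.Dict.get?_insert_self]
          rfl
        · obtain ⟨p, hp, hcur⟩ : ∃ p, bpick (winB l b limit (PySem.Int.floordiv (kv.1 - 1) b))
              = some p ∧ cur = (p.2, p.1) := by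
            have h2 := (ih (PySem.Int.floordiv (kv.1 - 1) b)).symm.trans hg
            rcases hbp : bpick (winB l b limit (PySem.Int.floordiv (kv.1 - 1) b)) with _ | p
            · rw [hbp] at h2; cases h2
            · rw [hbp] at h2
              exact ⟨p, rfl, (Option.some.inj h2).symm⟩
          rw [hp, hcur]
          by_cases hc : p.2 < kv.2 ∨ (p.2 = kv.2 ∧ p.1 ≤ kv.1)
          · simp [hc, bstep, PySem.Dict.get?_insert_self]
          · simp [hc, bstep, hg, hcur]
      · have hdecide : decide (1 ≤ kv.1 ∧ kv.1 ≤ limit ∧ PySem.Int.floordiv (kv.1 - 1) b = w)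
            = false := decide_eq_false (fun h => hw h.2.2)
        rw [show List.filter (fun kv' => decide (1 ≤ kv'.1 ∧ kv'.1 ≤ limit ∧
              PySem.Int.floordiv (kv'.1 - 1) b = w)) [kv] = [] from by simp only [List.filter_cons, List.filter_nil, hdecide]; simp]
        rw [List.append_nil]
        rw [show bstepB b limit (l.foldl (bstepB b limit) (PySem.Dict.mk [])) kv
              = (match (l.foldl (bstepB b limit) (PySem.Dict.mk [])).get?
                    (PySem.Int.floordiv (kv.1 - 1) b) with
                 | none => (l.foldl (bstepB b limit) (PySem.Dict.mk [])).insert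
                     (PySem.Int.floordiv (kv.1 - 1) b) (kv.2, kv.1)
                 | some cur =>
                     if cur.1 < kv.2 ∨ (cur.1 = kv.2 ∧ cur.2 ≤ kv.1) then
                       (l.foldl (bstepB b limit) (PySem.Dict.mk [])).insert
                         (PySem.Int.floordiv (kv.1 - 1) b) (kv.2, kv.1)
                     else (l.foldl (bstepB b limit) (PySem.Dict.mk []))) from by
            rw [bstepB, if_pos hlim]]
        rcases hg : (l.foldl (bstepB b limit) (PySem.Dict.mk [])).get?
            (PySem.Int.floordiv (kv.1 - 1) b) with _ | cur
        · rw [PySem.Dict.get?_insert_of_ne _ _ (fun h => hw h.symm)]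
          exact ih w
        · by_cases hc : cur.1 < kv.2 ∨ (cur.1 = kv.2 ∧ cur.2 ≤ kv.1)
          · simp only [hc, if_true]
            rw [PySem.Dict.get?_insert_of_ne _ _ (fun h => hw h.symm)]
            exact ih w
          · simp only [hc, if_false]
            exact ih w
    · have hdecide : decide (1 ≤ kv.1 ∧ kv.1 ≤ limit ∧ PySem.Int.floordiv (kv.1 - 1) b = w)
          = false := decide_eq_false (fun h => hlim ⟨h.1, h.2.1⟩)
      rw [show List.filter (fun kv' => decide (1 ≤ kv'.1 ∧ kv'.1 ≤ limit ∧
            PySem.Int.floordiv (kv'.1 - 1) b = w)) [kv] = [] from by simp only [List.filter_cons, List.filter_nil, hdecide]; simp]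
      rw [List.append_nil]
      rw [show bstepB b limit (l.foldl (bstepB b limit) (PySem.Dict.mk [])) kv
            = l.foldl (bstepB b limit) (PySem.Dict.mk []) from by rw [bstepB, if_neg hlim]]
      exact ih w

theorem bfold_keys_nodup (b limit : Int) (l : List (Int × Int)) :
    ((l.foldl (bstepB b limit) (PySem.Dict.mk [])).keys).Nodup := by
  induction l using List.reverseRecOn with
  | nil => simp [PySem.Dict.keys]
  | append_singleton l kv ih =>
    rw [List.foldl_append, List.foldl_cons, List.foldl_nil]
    set d := l.foldl (bstepB b limit) (PySem.Dict.mk []) with hd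
    rw [bstepB]
    by_cases hlim : 1 ≤ kv.1 ∧ kv.1 ≤ limit
    · rw [if_pos hlim]
      rcases hg : d.get? (PySem.Int.floordiv (kv.1 - 1) b) with _ | cur
      · have hnm : PySem.Int.floordiv (kv.1 - 1) b ∉ d.keys :=
          (dict_get?_eq_none_iff d _).mp hg
        rw [dict_keys_insert_of_not_mem d _ _ hnm]
        simp [List.Nodup.append, ih, hnm]
      · have hm : PySem.Int.floordiv (kv.1 - 1) b ∈ d.keys := by
          by_contra hcon
          rw [(dict_get?_eq_none_iff d _).mpr hcon] at hg
          cases hg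
        by_cases hc : cur.1 < kv.2 ∨ (cur.1 = kv.2 ∧ cur.2 ≤ kv.1)
        · simp only [hc, if_true]
          rw [dict_keys_insert_of_mem d _ _ hm]; exact ih
        · simp only [hc, if_false]
          exact ih
    · rw [if_neg hlim]; exact ih

def wstrOf (gs : List (Int × Int)) (lo hi : Int) : List String :=
  match bpick (winOf gs lo hi) with
  | none => []
  | some kv => [renderKV kv]

theorem ClipA_eq_map (a b : Int) : ClipA a b
    = (PySem.List.pyRange 0 (PySem.Int.truncdiv a b) 1).map (fun i => (i * b + 1, (i + 1) * b)) := by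
  rw [ClipA]
  rw [PySem.List.foldl_append_singleton_eq_map]
  rfl

-- A, reduced to a flatMap over the window indices
theorem A_closed (g : List (Int × Int)) (b : Int)
    (hnd : ((PySem.List.sorted g (fun x => x.1)).map Prod.fst).Nodup)
    (hlt : (PySem.List.sorted g (fun x => x.1)).Pairwise (fun x y => x.1 < y.1))
    (last : Int × Int)
    (hlast : PySem.List.pyGet? (PySem.List.sorted g (fun x => x.1)) (-1) = some last) :
    BestScoreAA g b = (PySem.List.pyRange 0 (PySem.Int.truncdiv (last.1 + 30) b) 1).flatMap
      (fun i => wstrOf (PySem.List.sorted g (fun x => x.1)) (i * b + 1) ((i + 1) * b)) := by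
  simp only [BestScoreAA, hlast]
  refine Eq.trans (PySem.List.foldl_congr_mem _ _
    (fun (acc : List String) (clip : Int × Int) =>
      acc ++ wstrOf (PySem.List.sorted g (fun x => x.1)) clip.1 clip.2) []
    (fun acc clip _ => ?_)) ?_
  · exact window_out (PySem.List.sorted g (fun x => x.1)) hnd hlt clip.1 clip.2 acc
  · rw [PySem.List.foldl_append_eq_flatMap, ClipA_eq_map, List.flatMap_map]
    rfl

-- B, reduced to a map over the sorted keys of the binning fold
theorem B_closed (g : List (Int × Int)) (b : Int) (last : Int × Int)
    (hlast : PySem.List.pyGet? (PySem.List.sorted g (fun x => x.1)) (-1) = some last) :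
    BestScoreAA_alt g b = (PySem.List.sorted
        ((PySem.List.sorted g (fun x => x.1)).foldl
          (bstepB b (PySem.Int.floordiv (last.1 + 30) b * b)) (PySem.Dict.mk [])).keys
        (fun w => w)).map
      (fun w => match ((PySem.List.sorted g (fun x => x.1)).foldl
          (bstepB b (PySem.Int.floordiv (last.1 + 30) b * b)) (PySem.Dict.mk [])).get? w with
        | some p => PySem.Int.toStr p.2 ++ "\t" ++ PySem.Int.toStr p.1
        | none => "") := by
  simp only [BestScoreAA_alt, hlast]
  rfl

theorem flatMap_match_eq_filter_map (l : List Int) (p : Int → Option (Int × Int))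
    (r : Int × Int → String) :
    l.flatMap (fun i => match p i with | none => [] | some kv => [r kv])
      = (l.filter (fun i => (p i).isSome)).map
          (fun i => match p i with | none => "" | some kv => r kv) := by
  induction l with
  | nil => rfl
  | cons x t ih =>
    rw [List.flatMap_cons, List.filter_cons]
    rcases hp : p x with _ | kv
    · simp only [Option.isSome_none, Bool.false_eq_true, if_false, List.nil_append]
      exact ih
    · simp only [hp, Option.isSome_some, if_true, List.map_cons, List.cons_append,
        List.nil_append]
      rw [ih]

-- ===== VERDICT (by name: the statement is the Claim_ definition above) =====
theorem BestScoreAA_spec : Claim_equal_BestScoreAA := by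
  intro g b _hdom hpre
  obtain ⟨hne, hb, hnd⟩ := hpre
  have hgsne : PySem.List.sorted g (fun x => x.1) ≠ [] := by
    rw [Ne, PySem.List.sorted_eq_nil_iff]; exact hne
  have hperm : (PySem.List.sorted g (fun x => x.1)).Perm g := PySem.List.sorted_perm g _ _
  have hndgs : ((PySem.List.sorted g (fun x => x.1)).map Prod.fst).Nodup :=
    (hperm.map Prod.fst).nodup_iff.mpr hnd
  have hple : (PySem.List.sorted g (fun x => x.1)).Pairwise (fun x y => x.1 ≤ y.1) :=
    PySem.List.sorted_pairwise g (fun x => x.1)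
  have hplt : (PySem.List.sorted g (fun x => x.1)).Pairwise (fun x y => x.1 < y.1) :=
    pairwise_lt_of_le_nodup _ hple hndgs
  have hlast : PySem.List.pyGet? (PySem.List.sorted g (fun x => x.1)) (-1)
      = some ((PySem.List.sorted g (fun x => x.1)).getLast hgsne) := by
    rw [pyGet_neg_one, List.getLast?_eq_some_getLast]
  set gs := PySem.List.sorted g (fun x => x.1) with hgs
  set last := gs.getLast hgsne with hlastdef
  show BestScoreAA g b = BestScoreAA_alt g b
  rw [A_closed g b hndgs hplt last hlast, B_closed g b last hlast]
  rw [← hgs]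
  by_cases ha : 0 ≤ last.1 + 30
  · -- the common window count
    have hNt : PySem.Int.truncdiv (last.1 + 30) b = (last.1 + 30) / b :=
      Int.tdiv_eq_ediv_of_nonneg ha
    have hNf : PySem.Int.floordiv (last.1 + 30) b = (last.1 + 30) / b :=
      Int.fdiv_eq_ediv_of_nonneg _ hb.le
    rw [hNt, hNf]
    set N := (last.1 + 30) / b with hN
    -- each A-window inside the range is the corresponding bin
    have hwin : ∀ i ∈ PySem.List.pyRange 0 N 1,
        winOf gs (i * b + 1) ((i + 1) * b) = winB gs b (N * b) i := by
      intro i hi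
      obtain ⟨hi0, hiN⟩ := PySem.List.mem_pyRange_one.mp hi
      rw [winOf, winB]
      refine List.filter_congr (fun kv _ => ?_)
      refine decide_eq_decide.mpr ?_
      constructor
      · rintro ⟨h1, h2⟩
        have hib : 0 ≤ i * b := mul_nonneg hi0 hb.le
        have hNb : (i + 1) * b ≤ N * b := mul_le_mul_of_nonneg_right (by omega) hb.le
        exact ⟨by omega, by omega,
          (PySem.Int.floordiv_eq_iff_of_pos hb).mpr ⟨by omega, by omega⟩⟩
      · rintro ⟨h1, h2, h3⟩
        obtain ⟨h4, h5⟩ := (PySem.Int.floordiv_eq_iff_of_pos hb).mp h3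
        exact ⟨by omega, by omega⟩
    -- bins of in-range sites land inside the range
    have hbin : ∀ w, winB gs b (N * b) w ≠ [] → w ∈ PySem.List.pyRange 0 N 1 := by
      intro w hwne
      obtain ⟨kv, hkv⟩ := List.exists_mem_of_ne_nil _ hwne
      rw [winB] at hkv
      obtain ⟨_, hprop⟩ := List.mem_filter.mp hkv
      obtain ⟨h1, h2, h3⟩ := of_decide_eq_true hprop
      refine PySem.List.mem_pyRange_one.mpr ⟨?_, ?_⟩
      · rw [← h3]
        exact (PySem.Int.le_floordiv_iff_mul_le hb).mpr (by omega)
      · rw [← h3]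
        exact (PySem.Int.floordiv_lt_iff_lt_mul hb).mpr (by omega)
    have hget := bfold_get? b (N * b) gs
    have hkeysnd := bfold_keys_nodup b (N * b) gs
    -- the sorted key list is the increasing list of nonempty bins
    have hmemkeys : ∀ w,
        w ∈ ((gs.foldl (bstepB b (N * b)) (PySem.Dict.mk [])).keys)
          ↔ w ∈ (PySem.List.pyRange 0 N 1).filter
              (fun i => (bpick (winB gs b (N * b) i)).isSome) := by
      intro w
      constructor
      · intro hw
        have hgw : (gs.foldl (bstepB b (N * b)) (PySem.Dict.mk [])).get? w ≠ none := by
          rw [Ne, dict_get?_eq_none_iff]; exact fun h => h hw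
        rw [hget w] at hgw
        have hbp : bpick (winB gs b (N * b) w) ≠ none := by
          intro h; rw [h] at hgw; exact hgw rfl
        refine List.mem_filter.mpr ⟨?_, Option.isSome_iff_ne_none.mpr hbp⟩
        exact hbin w (fun h => hbp (by rw [h]; rfl))
      · intro hw
        obtain ⟨_, hsome⟩ := List.mem_filter.mp hw
        have hbp := Option.isSome_iff_ne_none.mp hsome
        have : (gs.foldl (bstepB b (N * b)) (PySem.Dict.mk [])).get? w ≠ none := by
          rw [hget w]
          intro h
          exact hbp (Option.map_eq_none_iff.mp h)
        by_contra hcon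
        exact this ((dict_get?_eq_none_iff _ _).mpr hcon)
    have hWnd : ((PySem.List.pyRange 0 N 1).filter
        (fun i => (bpick (winB gs b (N * b) i)).isSome)).Nodup :=
      (pyrange_nodup N).filter _
    have hWlt : ((PySem.List.pyRange 0 N 1).filter
        (fun i => (bpick (winB gs b (N * b) i)).isSome)).Pairwise (· < ·) :=
      (pyrange_pairwise_lt N).filter _
    have hsorted : PySem.List.sorted
        ((gs.foldl (bstepB b (N * b)) (PySem.Dict.mk [])).keys) (fun w => w)
        = (PySem.List.pyRange 0 N 1).filter
            (fun i => (bpick (winB gs b (N * b) i)).isSome) :=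
      PySem.List.sorted_eq_of_perm_of_pairwise_lt _ _ _
        ((List.perm_ext_iff_of_nodup hWnd hkeysnd).mpr (fun a => (hmemkeys a).symm))
        hWlt
    rw [hsorted]
    -- A's flatMap as filter-then-map, over the same bins
    have hA : ∀ i, wstrOf gs (i * b + 1) ((i + 1) * b)
        = (fun i => match bpick (winOf gs (i * b + 1) ((i + 1) * b)) with
           | none => []
           | some kv => [renderKV kv]) i := fun i => rfl
    rw [show (fun i => wstrOf gs (i * b + 1) ((i + 1) * b))
          = (fun i => match bpick (winOf gs (i * b + 1) ((i + 1) * b)) with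
             | none => []
             | some kv => [renderKV kv]) from funext hA]
    rw [flatMap_match_eq_filter_map (PySem.List.pyRange 0 N 1)
        (fun i => bpick (winOf gs (i * b + 1) ((i + 1) * b))) renderKV]
    rw [List.filter_congr (fun i hi => by rw [hwin i hi])]
    refine List.map_congr_left (fun w hw => ?_)
    have hwmem : w ∈ PySem.List.pyRange 0 N 1 := List.mem_of_mem_filter hw
    rw [hwin w hwmem, hget w]
    rcases hbpw : bpick (winB gs b (N * b) w) with _ | kv
    · rfl
    · rfl
  · -- no windows at all: both sides are empty
    have h1 : (0:Int) ≤ (-(last.1 + 30)).tdiv b := Int.tdiv_nonneg (by omega) hb.le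
    have h2 := Int.neg_tdiv (last.1 + 30) b
    have hcount : PySem.Int.truncdiv (last.1 + 30) b ≤ 0 := by
      show (last.1 + 30).tdiv b ≤ 0
      omega
    have hrange : PySem.List.pyRange 0 (PySem.Int.truncdiv (last.1 + 30) b) 1 = [] := by
      rw [pyrange_map_cast, show (PySem.Int.truncdiv (last.1 + 30) b).toNat = 0 by omega]
      rfl
    rw [hrange]
    have hlim : PySem.Int.floordiv (last.1 + 30) b * b ≤ last.1 + 30 := by
      rw [show PySem.Int.floordiv (last.1 + 30) b = (last.1 + 30) / b from
        Int.fdiv_eq_ediv_of_nonneg _ hb.le]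
      exact Int.ediv_mul_le _ (by omega)
    have hfold : gs.foldl (bstepB b (PySem.Int.floordiv (last.1 + 30) b * b))
        (PySem.Dict.mk []) = PySem.Dict.mk [] := by
      refine foldl_fixed_of_mem _ gs _ (fun d kv _ => ?_)
      rw [bstepB, if_neg (by omega)]
    rw [hfold]
    rfl
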